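/- GENERATED by c/gen_decode.py: decode facts of the image, one per distinct instruction byte string. -/
import UserX.DecodeImage

#decode_all Vorbis.Dec
  "01eb"  -- add ebx,ebp
  "0f83d1feffff"  -- jae 1099b9
  "0f84d0000000"  -- je 114d6f
  "0f8716040000"  -- ja 114b96
  "0f8ea1000000"  -- jle 10e3fb
  "0fb64db8"  -- movzx ecx,BYTE PTR [rbp-0x48]
  "2b4338"  -- sub eax,DWORD PTR [rbx+0x38]
  "4101c6"  -- add r14d,eax
  "41395e04"  -- cmp DWORD PTR [r14+0x4],ebx
  "4183f907"  -- cmp r9d,0x7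
  "4189f6"  -- mov r14d,esi
  "41bf02000000"  -- mov r15d,0x2
  "4288442321"  -- mov BYTE PTR [rbx+r12*1+0x21],al
  "4439642410"  -- cmp DWORD PTR [rsp+0x10],r12d
  "44896308"  -- mov DWORD PTR [rbx+0x8],r12d
  "4489c7"  -- mov edi,r8d
  "448b75f0"  -- mov r14d,DWORD PTR [rbp-0x10]
  "450fb6ec"  -- movzx r13d,r12b
  "4589e8"  -- mov r8d,r13d
  "4688b46b41040000"  -- mov BYTE PTR [rbx+r13*2+0x441],r14b
  "486344242c"  -- movsxd rax,DWORD PTR [rsp+0x2c]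
  "4881c4b8000000"  -- add rsp,0xb8
  "4883fe01"  -- cmp rsi,0x1
  "4889bd50ffffff"  -- mov QWORD PTR [rbp-0xb0],rdi
  "488b542418"  -- mov rdx,QWORD PTR [rsp+0x18]
  "488bbd30080000"  -- mov rdi,QWORD PTR [rbp+0x830]
  "488d742430"  -- lea rsi,[rsp+0x30]
  "488d7de8"  -- lea rdi,[rbp-0x18]
  "488dbbcc050000"  -- lea rdi,[rbx+0x5cc]
  "488dbde4060000"  -- lea rdi,[rbp+0x6e4]
  "48c7458000ec1000"  -- mov QWORD PTR [rbp-0x80],0x10ec00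
  "4939df"  -- cmp r15,rbx
  "4989d5"  -- mov r13,rdx
  "498d7c241a"  -- lea rdi,[r12+0x1a]
  "498dbe38080000"  -- lea rdi,[r14+0x838]
  "4a8d7c3331"  -- lea rdi,[rbx+r14*1+0x31]
  "4c03a538010000"  -- add r12,QWORD PTR [rbp+0x138]
  "4c89adc8010000"  -- mov QWORD PTR [rbp+0x1c8],r13
  "4c8b7c2418"  -- mov r15,QWORD PTR [rsp+0x18]
  "4c8dad8c000000"  -- lea r13,[rbp+0x8c]
  "4d89fd"  -- mov r13,r15
  "660f28c3"  -- movapd xmm0,xmm3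
  "66410f6ed7"  -- movd xmm2,r15d
  "66480f6efb"  -- movq xmm7,rbx
  "7417"  -- je 10c7b7
  "74e9"  -- je 108fe1
  "771c"  -- ja 100325
  "7e01"  -- jle 100325
  "7fa4"  -- jg 1087ef
  "837c241c00"  -- cmp DWORD PTR [rsp+0x1c],0x0
  "85c0"  -- test eax,eax
  "896b78"  -- mov DWORD PTR [rbx+0x78],ebp
  "89df"  -- mov edi,ebx
  "8b542418"  -- mov edx,DWORD PTR [rsp+0x18]
  "8b8be4060000"  -- mov ecx,DWORD PTR [rbx+0x6e4]
  "b801000000"  -- mov eax,0x1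
  "c1e602"  -- shl esi,0x2
  "c7805401c000f3f3f3f3"  -- mov DWORD PTR [rax+0xc00154],0xf3f3f3f3
  "d3e3"  -- shl ebx,cl
  "e808effeff"  -- call 100640
  "e812acfeff"  -- call 100300
  "e81c45ffff"  -- call 108f20
  "e826abfeff"  -- call 100560
  "e82efdffff"  -- call 103360
  "e8396dffff"  -- call 100720
  "e844efffff"  -- call 1003c0
  "e84ea8feff"  -- call 1003c0
  "e85a70ffff"  -- call 100640
  "e868bdfeff"  -- call 100800
  "e87372ffff"  -- call 100640
  "e87db3ffff"  -- call 100640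
  "e88983ffff"  -- call 100720
  "e892feffff"  -- call 108f20
  "e89d0dffff"  -- call 103d00
  "e8a77fffff"  -- call 10d1c0
  "e8b18fffff"  -- call 100800
  "e8bb78ffff"  -- call 10d1c0
  "e8c5b4feff"  -- call 100640
  "e8cf80ffff"  -- call 100300
  "e8d9eafeff"  -- call 100640
  "e8e376ffff"  -- call 100640
  "e8ec68ffff"  -- call 100720
  "e8f635ffff"  -- call 108f20
  "e904f6ffff"  -- jmp 113b22
  "e947fcffff"  -- jmp 114710
  "e9990b0000"  -- jmp 10faa1
  "e9ec000000"  -- jmp 113e77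
  "eb62"  -- jmp 10796f
  "ebdb"  -- jmp 10bb51
  "f20f58059fd70100"  -- addsd xmm0,QWORD PTR [rip+0x1d79f]
  "f20f5e151ce00100"  -- divsd xmm2,QWORD PTR [rip+0x1e01c]
  "f30f104db0"  -- movss xmm1,DWORD PTR [rbp-0x50]
  "f30f1073fc"  -- movss xmm6,DWORD PTR [rbx-0x4]
  "f30f114df0"  -- movss DWORD PTR [rbp-0x10],xmm1
  "f30f11742410"  -- movss DWORD PTR [rsp+0x10],xmm6
  "f30f58cb"  -- addss xmm1,xmm3
  "f30f59dc"  -- mulss xmm3,xmm4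
  "f3410f101424"  -- movss xmm2,DWORD PTR [r12]
  "f3410f584508"  -- addss xmm0,DWORD PTR [r13+0x8]
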